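-- pv_equiv track=rewrite | github.com/emberling/mfvitools | experimental/sxc2mml.py | specify_note_duration
-- ===== SOURCE A (Python) =====
-- import sys, os, itertools
--
-- def specify_note_duration(note, dur):
--     target_note_table = [0xC0, 0x60, 0x40, 0x48, 0x30, 0x20, 0x24, 0x18, 0x10, 0x0C, 0x08, 0x06, 0x04, 0x03]
--     ff6_duration_table = ["1", "2", "3", "4.", "4", "6", "8.", "8", "12", "16", "24", "32", "48", "64"]
--     key = {target_note_table[i]: ff6_duration_table[i] for i in range(len(target_note_table))}
--
--     if not dur:
--         return ""
--
--     solution = []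
--     if dur in target_note_table:
--         solution = [dur]
--     target_note_table = [t for t in target_note_table if t <= dur]
--     if not solution:
--         for c in itertools.combinations(target_note_table, 2):
--             if sum(c) == dur:
--                 solution = c
--                 break
--     # if CONFIG_EXPAND_NOTES_TO_THREE and not solution:
--         # for c in itertools.combinations(target_note_table, 3):
--             # if sum(c) == dur:
--                 # solution = c
--                 # break
--     if solution:
--         text = ""
--         for i, s in enumerate(solution):
--             text += "^" if i else f"{note}"
--             text += f"{key[s]}"
--     else:
--         text = f"&{dur}{note}"
--
--     return text
-- ===== SOURCE B (Python) =====
-- def specify_note_duration(note, dur):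
--     notes = [0xC0, 0x60, 0x40, 0x48, 0x30, 0x20, 0x24, 0x18, 0x10, 0x0C, 0x08, 0x06, 0x04, 0x03]
--     names = ["1", "2", "3", "4.", "4", "6", "8.", "8", "12", "16", "24", "32", "48", "64"]
--     key = dict(zip(notes, names))
--
--     if not dur:
--         return ""
--     if dur in key:
--         return f"{note}{key[dur]}"
--
--     # two-note case: hash-complement scan instead of scanning all pairs;
--     # idx[need] > i reproduces the combinations(…, 2) ordering exactly
--     filtered = [t for t in notes if t <= dur]
--     idx = {v: i for i, v in enumerate(filtered)}
--     for i, a in enumerate(filtered):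
--         need = dur - a
--         j = idx.get(need)
--         if j is not None and j > i:
--             return f"{note}{key[a]}^{key[need]}"
--     return f"&{dur}{note}"
-- ===== Notes on version B (the rewrite author's own statement) =====
-- stated objective: idiomatic
-- what changed: Replaced the combinations(table,2) pair scan with a single hash-complement pass over the filtered table (idx = {value: position}; accept dur-a only when its stored position exceeds i, which reproduces the combinations ordering), and replaced the enumerate/fold text assembly with direct early returns.
import Mathlib
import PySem

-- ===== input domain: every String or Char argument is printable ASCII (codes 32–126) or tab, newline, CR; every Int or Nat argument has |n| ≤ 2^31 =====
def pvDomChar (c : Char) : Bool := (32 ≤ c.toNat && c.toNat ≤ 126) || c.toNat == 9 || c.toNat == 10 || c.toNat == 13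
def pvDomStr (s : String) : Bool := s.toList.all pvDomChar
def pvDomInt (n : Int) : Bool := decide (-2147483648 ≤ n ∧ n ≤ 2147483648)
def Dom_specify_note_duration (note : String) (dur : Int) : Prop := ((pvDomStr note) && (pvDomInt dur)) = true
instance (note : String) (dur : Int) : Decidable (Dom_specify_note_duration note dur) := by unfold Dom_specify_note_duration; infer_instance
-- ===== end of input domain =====

-- B replaces A's combinations(table, 2) pair scan with a single hash-complement pass
-- (idx maps value -> position; a match is accepted only when idx[dur-a] > i, which
-- reproduces the combinations ordering), and assembles the text by direct returns.

-- ===== PORT A =====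
def pvATable : List Int := [0xC0, 0x60, 0x40, 0x48, 0x30, 0x20, 0x24, 0x18, 0x10, 0x0C, 0x08, 0x06, 0x04, 0x03]
def pvANames : List String := ["1", "2", "3", "4.", "4", "6", "8.", "8", "12", "16", "24", "32", "48", "64"]
-- key = {target_note_table[i]: ff6_duration_table[i] for i in range(len(target_note_table))}
def pvAKey : PySem.Dict Int String :=
  (PySem.List.pyRange 0 14 1).foldl
    (fun d i => d.insert (PySem.List.pyGetD pvATable i 0) (PySem.List.pyGetD pvANames i "")) PySem.Dict.empty
-- itertools.combinations(xs, 2), in itertools order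
def pvACombos2 : List Int → List (Int × Int)
  | [] => []
  | x :: rest => rest.map (fun y => (x, y)) ++ pvACombos2 rest
def specify_note_duration (note : String) (dur : Int) : String :=
  if dur = 0 then "" else
  let solution : List Int := if pvATable.contains dur then [dur] else []
  let filtered := pvATable.filter (fun t => t ≤ dur)
  let solution : List Int :=
    if solution = [] then
      match (pvACombos2 filtered).find? (fun c => c.1 + c.2 = dur) with
      | some c => [c.1, c.2]
      | none => []
    else solution
  if solution ≠ [] then
    -- key[s] never misses (solution elements come from the table); getD "" is exact here
    (PySem.List.enumerate solution).foldl
      (fun text p => text ++ (if p.1 = 0 then note else "^") ++ (pvAKey.getD p.2 "")) ""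
  else "&" ++ PySem.Int.toStr dur ++ note

-- ===== PORT B =====
def pvBNotes : List Int := [0xC0, 0x60, 0x40, 0x48, 0x30, 0x20, 0x24, 0x18, 0x10, 0x0C, 0x08, 0x06, 0x04, 0x03]
def pvBNames : List String := ["1", "2", "3", "4.", "4", "6", "8.", "8", "12", "16", "24", "32", "48", "64"]
-- key = dict(zip(notes, names))
def pvBKey : PySem.Dict Int String :=
  (pvBNotes.zip pvBNames).foldl (fun d p => d.insert p.1 p.2) PySem.Dict.empty
-- idx = {v: i for i, v in enumerate(filtered)}
def pvBIdx (filtered : List Int) : PySem.Dict Int Int :=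
  (PySem.List.enumerate filtered).foldl (fun d p => d.insert p.2 p.1) PySem.Dict.empty
-- the for-loop over enumerate(filtered) with its early return
def pvBLoop (dur : Int) (idx : PySem.Dict Int Int) : List (Int × Int) → Option (Int × Int)
  | [] => none
  | p :: rest =>
      let need := dur - p.2
      match idx.get? need with
      | some j => if j > p.1 then some (p.2, need) else pvBLoop dur idx rest
      | none => pvBLoop dur idx rest
def specify_note_duration_alt (note : String) (dur : Int) : String :=
  if dur = 0 then "" else
  match pvBKey.get? dur with
  | some nm => note ++ nm
  | none =>
    let filtered := pvBNotes.filter (fun t => t ≤ dur)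
    match pvBLoop dur (pvBIdx filtered) (PySem.List.enumerate filtered) with
    | some q => note ++ (pvBKey.getD q.1 "") ++ "^" ++ (pvBKey.getD q.2 "")
    | none => "&" ++ PySem.Int.toStr dur ++ note

-- ===== PRECONDITION & SPEC =====
def Spec_specify_note_duration (note : String) (dur : Int) (out : String) : Prop := out = specify_note_duration_alt note dur
instance (note : String) (dur : Int) (out : String) : Decidable (Spec_specify_note_duration note dur out) := by unfold Spec_specify_note_duration; infer_instance

-- ===== CLAIM (what is proved, stated in full; the proofs are below) =====
def Claim_equal_specify_note_duration : Prop := ∀ (note : String) (dur : Int), Dom_specify_note_duration note dur → Spec_specify_note_duration note dur (specify_note_duration note dur)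

-- ===== LEMMAS AND PROOFS =====

theorem key_eq : pvAKey = pvBKey := by decide

theorem table_eq : pvATable = pvBNotes := rfl

theorem notes_nodup : pvBNotes.Nodup := by decide

-- the idx dict built over a duplicate-free list: its items are the swapped enumerate pairs
theorem idx_items (xs : List Int) (h : xs.Nodup) :
    (pvBIdx xs).items = (PySem.List.enumerate xs).map (fun p => (p.2, p.1)) := by
  unfold pvBIdx
  rw [PySem.Dict.items_foldl_insert_fresh]
  · rfl
  · intro a _; exact PySem.Dict.contains_empty _
  · rw [PySem.List.map_snd_enumerate]; exact h

theorem idx_keys (xs : List Int) (h : xs.Nodup) : (pvBIdx xs).keys = xs := by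
  simp only [PySem.Dict.keys, idx_items xs h, List.map_map]
  exact PySem.List.map_snd_enumerate xs 0

theorem idx_get_iff (xs : List Int) (h : xs.Nodup) (v j : Int) :
    (pvBIdx xs).get? v = some j ↔ ∃ (k : Nat) (hk : k < xs.length), j = (k : Int) ∧ v = xs[k] := by
  have hnk : (pvBIdx xs).keys.Nodup := by rw [idx_keys xs h]; exact h
  rw [PySem.Dict.get?_eq_some_iff_mem_items _ _ _ hnk, idx_items xs h, List.mem_map]
  constructor
  · rintro ⟨p, hp, he⟩
    rw [PySem.List.mem_enumerate_iff] at hp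
    obtain ⟨k, hk, rfl⟩ := hp
    refine ⟨k, hk, ?_, ?_⟩
    · have := congrArg Prod.snd he; simpa using this.symm
    · have := congrArg Prod.fst he; simpa using this.symm
  · rintro ⟨k, hk, rfl, rfl⟩
    refine ⟨((k : Int), xs[k]), ?_, rfl⟩
    rw [PySem.List.mem_enumerate_iff]
    exact ⟨k, hk, by simp⟩

-- find? with the complement predicate finds exactly the complement
theorem find?_shift (a dur : Int) (l : List Int) (hm : dur - a ∈ l) :
    l.find? (fun y => decide (a + y = dur)) = some (dur - a) := by
  induction l with
  | nil => cases hm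
  | cons x r ih =>
    by_cases hx : a + x = dur
    · have hxe : x = dur - a := by omega
      simp [hxe]
    · have hxe : x ≠ dur - a := by omega
      have hm' : dur - a ∈ r := by
        rcases List.mem_cons.mp hm with h1 | h1
        · exact absurd h1.symm hxe
        · exact h1
      simpa [List.find?_cons, hx] using ih hm'

theorem find?_shift_none (a dur : Int) (l : List Int) (hm : dur - a ∉ l) :
    l.find? (fun y => decide (a + y = dur)) = none := by
  rw [List.find?_eq_none]
  intro y hy
  simp only [decide_eq_true_eq]
  intro he
  apply hm
  have hye : y = dur - a := by omega
  rwa [hye] at hy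

-- the hash-complement loop over a suffix equals the combinations(…,2) scan of that suffix
theorem loop_eq_find_aux (dur : Int) (pre tail : List Int) (h : (pre ++ tail).Nodup) :
    pvBLoop dur (pvBIdx (pre ++ tail)) (PySem.List.enumerate tail (pre.length : Int)) =
      (pvACombos2 tail).find? (fun c => decide (c.1 + c.2 = dur)) := by
  induction tail generalizing pre with
  | nil => simp [pvBLoop, pvACombos2, PySem.List.enumerate_nil]
  | cons a rest ih =>
    have hx : pre ++ a :: rest = (pre ++ [a]) ++ rest := by simp
    have hnd : ((pre ++ [a]) ++ rest).Nodup := by rwa [hx] at h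
    have hih := ih (pre ++ [a]) hnd
    rw [List.length_append, List.length_cons, List.length_nil] at hih
    push_cast at hih
    rw [PySem.List.enumerate_cons, hx]
    unfold pvACombos2
    rw [List.find?_append, List.find?_map]
    have hcomp : ((fun c : Int × Int => decide (c.1 + c.2 = dur)) ∘ fun y => (a, y)) =
        fun y => decide (a + y = dur) := rfl
    rw [hcomp]
    rcases hg : (pvBIdx ((pre ++ [a]) ++ rest)).get? (dur - a) with _ | j
    · -- no complement anywhere in the list: the block of pairs headed by a finds nothing
      have hnm : dur - a ∉ rest := by
        intro hmem
        rw [PySem.Dict.get?_eq_none_iff_not_mem_keys, idx_keys _ hnd] at hg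
        exact hg (by simp [hmem])
      rw [find?_shift_none a dur rest hnm]
      simp only [pvBLoop, hg]
      exact hih
    · rw [idx_get_iff _ hnd _ _] at hg
      obtain ⟨k, hk, rfl, hv⟩ := hg
      by_cases hgt : ((k : Int)) > (pre.length : Int)
      · -- stored position after i: the complement sits in rest, both sides return (a, dur-a)
        have hmem : dur - a ∈ rest := by
          have hge : (pre ++ [a]).length ≤ k := by simp; omega
          have hgetr := List.getElem_append_right (as := pre ++ [a]) (bs := rest) (i := k) hge (h₂ := hk)
          rw [hv, hgetr]
          exact List.getElem_mem _
        rw [find?_shift a dur rest hmem]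
        have hloop : pvBLoop dur (pvBIdx ((pre ++ [a]) ++ rest))
            (((pre.length : Int), a) :: PySem.List.enumerate rest ((pre.length : Int) + 1)) =
            some (a, dur - a) := by
          simp only [pvBLoop]
          rw [idx_get_iff _ hnd _ _ |>.mpr ⟨k, hk, rfl, hv⟩]
          simp [hgt]
        rw [hloop]
        simp
      · -- stored position at or before i: the complement is not in rest; both sides continue
        have hnm : dur - a ∉ rest := by
          intro hmem
          obtain ⟨m, hm, hme⟩ := List.getElem_of_mem hmem
          have hml : (pre ++ [a]).length + m < ((pre ++ [a]) ++ rest).length := by simp; omega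
          have hgetr : ((pre ++ [a]) ++ rest)[(pre ++ [a]).length + m]'hml = rest[m] := by
            rw [List.getElem_append_right (by omega)]
            congr 1
            omega
          have heq2 : ((pre ++ [a]) ++ rest)[k] = ((pre ++ [a]) ++ rest)[(pre ++ [a]).length + m]'hml := by
            rw [hgetr, hme, ← hv]
          have hki := (List.Nodup.getElem_inj_iff hnd).mp heq2
          simp only [List.length_append, List.length_cons, List.length_nil] at hki
          omega
        rw [find?_shift_none a dur rest hnm]
        have hloop : pvBLoop dur (pvBIdx ((pre ++ [a]) ++ rest))
            (((pre.length : Int), a) :: PySem.List.enumerate rest ((pre.length : Int) + 1)) =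
            pvBLoop dur (pvBIdx ((pre ++ [a]) ++ rest)) (PySem.List.enumerate rest ((pre.length : Int) + 1)) := by
          simp only [pvBLoop]
          rw [idx_get_iff _ hnd _ _ |>.mpr ⟨k, hk, rfl, hv⟩]
          simp [hgt]
        rw [hloop, hih]
        simp

theorem loop_eq_find (dur : Int) (xs : List Int) (h : xs.Nodup) :
    pvBLoop dur (pvBIdx xs) (PySem.List.enumerate xs) =
      (pvACombos2 xs).find? (fun c => decide (c.1 + c.2 = dur)) := by
  have := loop_eq_find_aux dur [] xs (by simpa using h)
  simpa using this

-- ===== VERDICT (by name: the statement is the Claim_ definition above) =====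
theorem specify_note_duration_spec : Claim_equal_specify_note_duration := by
  unfold Claim_equal_specify_note_duration Spec_specify_note_duration
  intro note dur _
  unfold specify_note_duration specify_note_duration_alt
  by_cases h0 : dur = 0
  · simp [h0]
  · simp only [h0, if_false]
    have hnodup : (pvBNotes.filter (fun t => decide (t ≤ dur))).Nodup :=
      notes_nodup.filter _
    have hks : pvBKey.keys = pvBNotes := by decide
    by_cases hmem : dur ∈ pvBNotes
    · -- single-note branch
      have hct : pvATable.contains dur = true := by
        rw [table_eq]; exact List.contains_iff_mem.mpr hmem
      have hsome : ∃ nm, pvBKey.get? dur = some nm := by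
        have hc : pvBKey.contains dur = true := by
          rw [PySem.Dict.contains_iff_mem_keys, hks]; exact hmem
        rw [PySem.Dict.contains_eq_isSome_get?] at hc
        exact Option.isSome_iff_exists.mp hc
      obtain ⟨nm, hnm⟩ := hsome
      simp only [hct, if_true, hnm]
      simp [PySem.List.enumerate_cons, PySem.List.enumerate_nil,
        PySem.Dict.getD_eq_get?_getD, key_eq, hnm, String.empty_append]
    · -- pair-search branch
      have hnone : pvBKey.get? dur = none := by
        rw [PySem.Dict.get?_eq_none_iff_not_mem_keys, hks]; exact hmem
      simp only [hnone, table_eq]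
      rw [loop_eq_find dur _ hnodup]
      rcases hf : (pvACombos2 (pvBNotes.filter (fun t => decide (t ≤ dur)))).find?
          (fun c => decide (c.1 + c.2 = dur)) with _ | c
      · simp [hmem, hf]
      · have hp := List.find?_some hf
        simp only [decide_eq_true_eq] at hp
        simp [hmem, hf, PySem.List.enumerate_cons, PySem.List.enumerate_nil,
          PySem.Dict.getD_eq_get?_getD, key_eq, String.empty_append, String.append_assoc]
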